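-- pv_equiv track=rewrite | github.com/JoaquinPoggio/Trabajo-Practico-N-3 | 15.py | entrenadores_con_pokemons_repetidos
-- ===== SOURCE A (Python) =====
-- def entrenadores_con_pokemons_repetidos(lista):
--     result = []
--     for entrenador in lista:
--         nombres_pokemons = set()
--         tiene_repetidos = False
--         for pokemon in entrenador[-1]:
--             if pokemon[0] in nombres_pokemons:
--                 tiene_repetidos = True
--                 break
--             nombres_pokemons.add(pokemon[0])
--         if tiene_repetidos:
--             result.append(entrenador[0])
--     return result
-- ===== SOURCE B (Python) =====
-- def entrenadores_con_pokemons_repetidos(lista):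
--     def tiene_repetidos(pokemons):
--         nombres = sorted(p[0] for p in pokemons)
--         return any(a == b for a, b in zip(nombres, nombres[1:]))
--     return [nombre for nombre, pokemons in lista if tiene_repetidos(pokemons)]
-- ===== Notes on version B (the rewrite author's own statement) =====
-- stated objective: alternative
-- what changed: Detects duplicates per trainer by sorting the pokemon names and scanning for an equal adjacent pair, instead of A's incremental hash-set membership loop with an early break.
import Mathlib
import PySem

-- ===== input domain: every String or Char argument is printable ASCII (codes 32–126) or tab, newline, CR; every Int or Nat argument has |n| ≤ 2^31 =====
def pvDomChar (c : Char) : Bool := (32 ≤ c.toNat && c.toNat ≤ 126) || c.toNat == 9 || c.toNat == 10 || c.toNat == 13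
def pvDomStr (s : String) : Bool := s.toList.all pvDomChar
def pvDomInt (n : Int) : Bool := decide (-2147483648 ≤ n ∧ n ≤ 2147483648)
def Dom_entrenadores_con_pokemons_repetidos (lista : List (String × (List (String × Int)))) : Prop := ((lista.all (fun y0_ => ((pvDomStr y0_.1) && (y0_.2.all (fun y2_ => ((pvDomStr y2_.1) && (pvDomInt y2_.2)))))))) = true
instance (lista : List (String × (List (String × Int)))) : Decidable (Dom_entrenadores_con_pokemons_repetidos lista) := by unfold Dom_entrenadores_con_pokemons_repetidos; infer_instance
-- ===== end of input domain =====

-- B detects duplicates per trainer by sorting the names and scanning for an equal adjacent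
-- pair, instead of A's incremental set-membership loop with early break (objective: alternative).


-- ===== PORT A =====
-- inner 'for pokemon in entrenador[-1]' loop with its early 'break': returns tiene_repetidos
def pvTieneRepetidos (seen : PySem.Set String) : List (String × Int) → Bool
  | [] => false
  | p :: rest =>
    if PySem.Set.contains seen p.1 then true
    else pvTieneRepetidos (PySem.Set.add seen p.1) rest

def entrenadores_con_pokemons_repetidos (lista : List (String × (List (String × Int)))) : List String :=
  lista.foldl (fun result entrenador =>
    if pvTieneRepetidos PySem.Set.empty entrenador.2 then result ++ [entrenador.1] else result) []

-- ===== PORT B =====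
-- any(a == b for a, b in zip(nombres, nombres[1:])) on the sorted name list
def pvHasAdjDup : List String → Bool
  | a :: b :: t => a == b || pvHasAdjDup (b :: t)
  | _ => false

def entrenadores_con_pokemons_repetidos_alt (lista : List (String × (List (String × Int)))) : List String :=
  (lista.filter (fun e =>
      pvHasAdjDup (PySem.List.sorted (e.2.map Prod.fst) (fun x => x) false))).map Prod.fst

-- ===== PRECONDITION & SPEC =====
def Spec_entrenadores_con_pokemons_repetidos (lista : List (String × (List (String × Int)))) (out : List String) : Prop := out = entrenadores_con_pokemons_repetidos_alt lista
instance (lista : List (String × (List (String × Int)))) (out : List String) : Decidable (Spec_entrenadores_con_pokemons_repetidos lista out) := by unfold Spec_entrenadores_con_pokemons_repetidos; infer_instance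

-- ===== CLAIM (what is proved, stated in full; the proofs are below) =====
def Claim_equal_entrenadores_con_pokemons_repetidos : Prop := ∀ (lista : List (String × (List (String × Int)))), Dom_entrenadores_con_pokemons_repetidos lista → Spec_entrenadores_con_pokemons_repetidos lista (entrenadores_con_pokemons_repetidos lista)

-- ===== LEMMAS AND PROOFS =====

-- A's early-break loop reports no repeat exactly when seen ++ names stays duplicate-free
theorem pvTieneRepetidos_eq_false_iff (ps : List (String × Int)) :
    ∀ (seen : PySem.Set String), seen.Nodup →
      (pvTieneRepetidos seen ps = false ↔ (seen ++ ps.map Prod.fst).Nodup) := by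
  induction ps with
  | nil => intro seen hnd; simp [pvTieneRepetidos, hnd]
  | cons p rest ih =>
    intro seen hnd
    by_cases hmem : p.1 ∈ seen
    · have hc : PySem.Set.contains seen p.1 = true := (PySem.Set.contains_iff seen p.1).2 hmem
      simp only [pvTieneRepetidos, hc, if_true, List.map_cons]
      constructor
      · intro h; exact absurd h (by simp)
      · intro h
        exact absurd rfl ((List.nodup_append.1 h).2.2 p.1 hmem p.1 List.mem_cons_self)
    · have hc : PySem.Set.contains seen p.1 = false := by
        cases h : PySem.Set.contains seen p.1
        · rfl
        · exact absurd ((PySem.Set.contains_iff seen p.1).1 h) hmem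
      have hadd : PySem.Set.add seen p.1 = seen ++ [p.1] := PySem.Set.add_of_not_mem hmem
      have hnd' : (PySem.Set.add seen p.1).Nodup := PySem.Set.nodup_add seen p.1 hnd
      simp only [pvTieneRepetidos, hc, Bool.false_eq_true, if_false, List.map_cons]
      rw [ih _ hnd', hadd, List.append_assoc]
      simp

-- an ascending list has an equal adjacent pair exactly when it has a duplicate
theorem pvHasAdjDup_eq_false_iff (l : List String) (hp : l.Pairwise (· ≤ ·)) :
    pvHasAdjDup l = false ↔ l.Nodup := by
  induction l with
  | nil => simp [pvHasAdjDup]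
  | cons a t ih =>
    rcases List.pairwise_cons.1 hp with ⟨hle, hpt⟩
    cases t with
    | nil => simp [pvHasAdjDup]
    | cons b t' =>
      rcases List.pairwise_cons.1 hpt with ⟨hle', _⟩
      have hmem : a ∈ b :: t' ↔ a = b := by
        constructor
        · intro h
          rcases List.mem_cons.1 h with h | h
          · exact h
          · have h1 : a ≤ b := hle b (by simp)
            have h2 : b ≤ a := hle' a h
            exact le_antisymm h1 h2
        · intro h; rw [h]; simp
      simp only [pvHasAdjDup, Bool.or_eq_false_iff, ih hpt, List.nodup_cons, beq_eq_false_iff_ne]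
      constructor
      · rintro ⟨hne, hnd⟩; exact ⟨fun h => hne (hmem.1 h), hnd⟩
      · rintro ⟨hnm, hnd⟩; exact ⟨fun h => hnm (hmem.2 h), hnd⟩

-- the per-trainer conditions of A and B coincide
theorem pvCond_eq (ps : List (String × Int)) :
    pvTieneRepetidos PySem.Set.empty ps
      = pvHasAdjDup (PySem.List.sorted (ps.map Prod.fst) (fun x => x) false) := by
  have hA := pvTieneRepetidos_eq_false_iff ps PySem.Set.empty List.nodup_nil
  have hperm := PySem.List.sorted_perm (ps.map Prod.fst) (fun x => x) false
  have hB := pvHasAdjDup_eq_false_iff _ (PySem.List.sorted_pairwise (ps.map Prod.fst) (fun x => x))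
  have : pvTieneRepetidos PySem.Set.empty ps = false ↔
      pvHasAdjDup (PySem.List.sorted (ps.map Prod.fst) (fun x => x) false) = false := by
    rw [hB, hperm.nodup_iff]
    simpa [PySem.Set.empty] using hA
  rcases Bool.eq_false_or_eq_true (pvTieneRepetidos PySem.Set.empty ps) with h | h <;>
    rcases Bool.eq_false_or_eq_true
      (pvHasAdjDup (PySem.List.sorted (ps.map Prod.fst) (fun x => x) false)) with h' | h' <;>
    simp_all

theorem pv_foldl_filter (lista : List (String × (List (String × Int)))) :
    ∀ acc : List String,
      lista.foldl (fun result entrenador =>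
        if pvTieneRepetidos PySem.Set.empty entrenador.2 then result ++ [entrenador.1] else result) acc
      = acc ++ (lista.filter (fun e =>
          pvHasAdjDup (PySem.List.sorted (e.2.map Prod.fst) (fun x => x) false))).map Prod.fst := by
  induction lista with
  | nil => intro acc; simp
  | cons e rest ih =>
    intro acc
    simp only [List.foldl_cons]
    rw [pvCond_eq e.2]
    cases h : pvHasAdjDup (PySem.List.sorted (e.2.map Prod.fst) (fun x => x) false)
    · rw [if_neg (by simp), ih, List.filter_cons_of_neg (by simp [h])]
    · rw [if_pos (by simp), ih, List.filter_cons_of_pos (by simp [h])]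
      simp

-- ===== VERDICT (by name: the statement is the Claim_ definition above) =====
theorem entrenadores_con_pokemons_repetidos_spec : Claim_equal_entrenadores_con_pokemons_repetidos := by
  intro lista _
  show entrenadores_con_pokemons_repetidos lista = entrenadores_con_pokemons_repetidos_alt lista
  unfold entrenadores_con_pokemons_repetidos entrenadores_con_pokemons_repetidos_alt
  rw [pv_foldl_filter lista []]
  simp
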